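-- pv_equiv track=rewrite | github.com/wh-jung0522/AlgorithmStudy | Programmers/Level3/28.BestSet.py | solution
-- ===== SOURCE A (Python) =====
-- def solution(n, s):
--     '''
--     Step1. 평균값 구하기, 몫이 0보다 크면 일단 그걸로 채워넣기
--     Step2. 나머지가 0이 아니면, 나머지 수만큼은 몫 + 1씩
--
--     '''
--     answer = []
--     avg_num = s//n
--     if avg_num == 0:
--         return [-1]
--     num_of_larger = s%n
--     for i in range(n-num_of_larger):
--         answer.append(avg_num)
--
--     for i in range(num_of_larger):
--         answer.append(avg_num+1)
--
--     return answer
-- ===== SOURCE B (Python) =====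
-- def solution(n, s):
--     if s // n == 0:
--         return [-1]
--     return [(s + i) // n for i in range(n)]
-- ===== Notes on version B (the rewrite author's own statement) =====
-- stated objective: simpler
-- what changed: Replaces the remainder precomputation and two fill loops with a single pass computing each element directly as (s+i)//n.
import Mathlib
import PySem

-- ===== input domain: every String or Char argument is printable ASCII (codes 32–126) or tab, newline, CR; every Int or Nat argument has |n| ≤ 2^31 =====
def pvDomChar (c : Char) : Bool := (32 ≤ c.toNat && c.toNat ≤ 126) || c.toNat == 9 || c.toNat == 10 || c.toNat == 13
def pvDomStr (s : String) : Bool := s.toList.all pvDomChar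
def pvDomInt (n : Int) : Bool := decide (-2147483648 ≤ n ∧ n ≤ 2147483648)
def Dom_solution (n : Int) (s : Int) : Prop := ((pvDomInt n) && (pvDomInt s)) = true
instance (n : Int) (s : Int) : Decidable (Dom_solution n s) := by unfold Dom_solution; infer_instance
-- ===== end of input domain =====

-- B computes each element directly as (s+i)//n in one pass instead of A's remainder split
-- with two fill loops (objective: simpler).

-- ===== PORT A =====
def solution (n : Int) (s : Int) : List Int :=
  let answer : List Int := []
  let avg_num := PySem.Int.floordiv s n
  if avg_num = 0 then [-1]
  else
    let num_of_larger := PySem.Int.mod s n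
    let answer := (PySem.List.pyRange 0 (n - num_of_larger) 1).foldl
      (fun acc _ => acc ++ [avg_num]) answer
    let answer := (PySem.List.pyRange 0 num_of_larger 1).foldl
      (fun acc _ => acc ++ [avg_num + 1]) answer
    answer

-- ===== PORT B =====
def solution_alt (n : Int) (s : Int) : List Int :=
  if PySem.Int.floordiv s n = 0 then [-1]
  else (PySem.List.pyRange 0 n 1).map (fun i => PySem.Int.floordiv (s + i) n)

-- ===== PRECONDITION & SPEC =====
-- Pre_ excludes exactly n = 0, where Python A raises ZeroDivisionError.
def Pre_solution (n : Int) (s : Int) : Prop := n ≠ 0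
instance (n : Int) (s : Int) : Decidable (Pre_solution n s) := by unfold Pre_solution; infer_instance
def pvWitness_solution : Int × Int := (3, 7)

def Spec_solution (n : Int) (s : Int) (out : List Int) : Prop := out = solution_alt n s
instance (n : Int) (s : Int) (out : List Int) : Decidable (Spec_solution n s out) := by unfold Spec_solution; infer_instance

-- ===== CLAIM (what is proved, stated in full; the proofs are below) =====
def Claim_equal_solution : Prop := ∀ (n : Int) (s : Int), Dom_solution n s → Pre_solution n s → Spec_solution n s (solution n s)

-- ===== LEMMAS AND PROOFS =====

-- On [0, n - s%n) each element of B's formula is s//n.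
lemma floordiv_add_small (n s i : Int) (hn : 0 < n)
    (h0 : 0 ≤ i) (h1 : i < n - PySem.Int.mod s n) :
    PySem.Int.floordiv (s + i) n = PySem.Int.floordiv s n := by
  have hmul := PySem.Int.floordiv_mul_add_mod s n
  have hr0 := PySem.Int.mod_nonneg s hn
  rw [PySem.Int.floordiv_eq_iff_of_pos hn]
  constructor <;> nlinarith

-- On [n - s%n, n) each element of B's formula is s//n + 1.
lemma floordiv_add_large (n s i : Int) (hn : 0 < n)
    (h0 : n - PySem.Int.mod s n ≤ i) (h1 : i < n) :
    PySem.Int.floordiv (s + i) n = PySem.Int.floordiv s n + 1 := by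
  have hmul := PySem.Int.floordiv_mul_add_mod s n
  have hrlt := PySem.Int.mod_lt s hn
  rw [PySem.Int.floordiv_eq_iff_of_pos hn]
  constructor <;> nlinarith

-- ===== VERDICT (by name: the statement is the Claim_ definition above) =====
theorem solution_spec : Claim_equal_solution := by
  intro n s _ hpre
  unfold Spec_solution solution solution_alt
  simp only []
  by_cases hq : PySem.Int.floordiv s n = 0
  · simp [hq]
  · simp only [hq, if_false]
    rcases lt_or_gt_of_ne hpre with hn | hn
    · -- n < 0 : all three ranges are empty
      have hb := PySem.Int.mod_neg_bounds s hn
      rw [PySem.List.pyRange_one_eq_nil (a := 0) (b := n) (by omega),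
          PySem.List.pyRange_one_eq_nil (a := 0) (b := n - PySem.Int.mod s n) (by omega),
          PySem.List.pyRange_one_eq_nil (a := 0) (b := PySem.Int.mod s n) (by omega)]
      simp
    · -- n > 0
      set r := PySem.Int.mod s n with hr
      set q := PySem.Int.floordiv s n with hqdef
      have hr0 : 0 ≤ r := PySem.Int.mod_nonneg s hn
      have hrlt : r < n := PySem.Int.mod_lt s hn
      have h1 : (PySem.List.pyRange 0 (n - r) 1).map
          (fun i => PySem.Int.floordiv (s + i) n)
          = (PySem.List.pyRange 0 (n - r) 1).map (fun _ => q) :=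
        List.map_congr_left (fun i hi => by
          have := (PySem.List.mem_pyRange_one).1 hi
          exact floordiv_add_small n s i hn this.1 this.2)
      have h2 : (PySem.List.pyRange (n - r) n 1).map
          (fun i => PySem.Int.floordiv (s + i) n)
          = (PySem.List.pyRange (n - r) n 1).map (fun _ => q + 1) :=
        List.map_congr_left (fun i hi => by
          have := (PySem.List.mem_pyRange_one).1 hi
          exact floordiv_add_large n s i hn this.1 this.2)
      rw [PySem.List.foldl_append_singleton_eq_map,
          PySem.List.foldl_append_singleton_eq_map,
          PySem.List.pyRange_one_append 0 (n - r) n (by omega) (by omega),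
          List.map_append, h1, h2]
      simp only [List.nil_append, List.map_const', PySem.List.length_pyRange_one]
      congr 2
      omega
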